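-- pv_equiv track=rewrite | github.com/endlisnis/weather-records | reversedict.py | topNValuesLists
-- ===== SOURCE A (Python) =====
-- def topNValuesLists(db, count, bottomN=False):
--     ret = {}
--     if bottomN:
--         keyList = sorted(db.keys())
--     else:
--         keyList = reversed(sorted(db.keys()))
--     for i in keyList:
--         if sum(len(a) for a in ret.values()) < count:
--             ret[i] = db[i]
--             continue
--         break
--     return ret
-- ===== SOURCE B (Python) =====
-- def topNValuesLists(db, count, bottomN=False):
--     keys = sorted(db)
--     if not bottomN:
--         keys.reverse()
--     # prefix sums: total length of values selected BEFORE each key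
--     prefixes = []
--     total = 0
--     for k in keys:
--         prefixes.append(total)
--         total += len(db[k])
--     # lengths are non-negative, so prefixes is monotone: the first index whose
--     # prefix reaches count is exactly where the greedy selection stops
--     n = 0
--     while n < len(keys) and prefixes[n] < count:
--         n += 1
--     return {k: db[k] for k in keys[:n]}
-- ===== Notes on version B (the rewrite author's own statement) =====
-- stated objective: faster
-- what changed: Replaces the per-iteration rescan of all selected values (sum of len over ret.values() inside the loop) by one precomputed prefix-sum table over the ordered keys plus a cutoff-index scan, then builds the result dict in a single comprehension.
import Mathlib
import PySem

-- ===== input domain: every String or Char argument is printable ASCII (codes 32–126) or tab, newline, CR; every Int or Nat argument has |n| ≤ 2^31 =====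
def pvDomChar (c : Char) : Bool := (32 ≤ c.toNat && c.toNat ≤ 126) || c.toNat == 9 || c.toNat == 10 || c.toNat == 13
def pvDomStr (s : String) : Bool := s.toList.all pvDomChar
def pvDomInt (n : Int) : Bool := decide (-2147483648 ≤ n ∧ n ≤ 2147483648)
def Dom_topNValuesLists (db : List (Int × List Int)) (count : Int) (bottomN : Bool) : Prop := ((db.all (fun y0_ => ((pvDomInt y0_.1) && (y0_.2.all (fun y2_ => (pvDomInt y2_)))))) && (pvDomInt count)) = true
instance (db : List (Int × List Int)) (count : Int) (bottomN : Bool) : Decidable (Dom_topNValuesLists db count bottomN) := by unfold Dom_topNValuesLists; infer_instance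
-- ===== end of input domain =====

-- B replaces A's per-iteration rescan of the selected values by a precomputed
-- prefix-sum table and a cutoff index (objective: faster).

-- ===== PORT A =====
-- the for-loop with break: state is the dict ret; the inner sum over ret.values() is recomputed each iteration
def topNValuesLists.loop (db : List (Int × List Int)) (count : Int) :
    List Int → PySem.Dict Int (List Int) → PySem.Dict Int (List Int)
  | [], ret => ret
  | i :: rest, ret =>
    if (ret.values.map (fun a => (a.length : Int))).sum < count then
      topNValuesLists.loop db count rest (ret.insert i (((PySem.Dict.mk db).get? i).getD []))
    else ret

def topNValuesLists (db : List (Int × List Int)) (count : Int) (bottomN : Bool) : List (Int × List Int) :=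
  let keyList :=
    if bottomN then PySem.List.sorted ((PySem.Dict.mk db).keys) (fun x => x) false
    else (PySem.List.sorted ((PySem.Dict.mk db).keys) (fun x => x) false).reverse
  (topNValuesLists.loop db count keyList PySem.Dict.empty).items

-- ===== PORT B =====
-- prefixes[i] = total length of the values of keys[0..i-1] (the loop accumulating `total`)
def altPrefixes (db : List (Int × List Int)) : List Int → Int → List Int
  | [], _ => []
  | k :: rest, total => total :: altPrefixes db rest (total + (((PySem.Dict.mk db).get? k).getD []).length)

-- the while loop computing the cutoff index n
def altCut (count : Int) : List Int → Nat
  | [] => 0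
  | p :: rest => if p < count then altCut count rest + 1 else 0

def topNValuesLists_alt (db : List (Int × List Int)) (count : Int) (bottomN : Bool) : List (Int × List Int) :=
  let keys :=
    if bottomN then PySem.List.sorted (db.map (·.1)) (fun x => x) false
    else (PySem.List.sorted (db.map (·.1)) (fun x => x) false).reverse
  let prefixes := altPrefixes db keys 0
  let n := altCut count prefixes
  ((keys.take n).foldl (fun d k => d.insert k (((PySem.Dict.mk db).get? k).getD [])) PySem.Dict.empty).items

-- ===== PRECONDITION & SPEC =====
-- Pre_ excludes association lists with duplicate keys: they do not represent a
-- Python dict (dict construction collapses duplicates), so the argument is not reachable from Python.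
def Pre_topNValuesLists (db : List (Int × List Int)) (count : Int) (bottomN : Bool) : Prop :=
  (db.map (·.1)).Nodup
instance (db : List (Int × List Int)) (count : Int) (bottomN : Bool) : Decidable (Pre_topNValuesLists db count bottomN) := by unfold Pre_topNValuesLists; infer_instance

def pvWitness_topNValuesLists : (List (Int × List Int)) × Int × Bool := ([(1, [1, 2]), (2, [3])], 2, false)

def Spec_topNValuesLists (db : List (Int × List Int)) (count : Int) (bottomN : Bool) (out : List (Int × List Int)) : Prop := out = topNValuesLists_alt db count bottomN
instance (db : List (Int × List Int)) (count : Int) (bottomN : Bool) (out : List (Int × List Int)) : Decidable (Spec_topNValuesLists db count bottomN out) := by unfold Spec_topNValuesLists; infer_instance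

-- ===== CLAIM (what is proved, stated in full; the proofs are below) =====
def Claim_equal_topNValuesLists : Prop := ∀ (db : List (Int × List Int)) (count : Int) (bottomN : Bool), Dom_topNValuesLists db count bottomN → Pre_topNValuesLists db count bottomN → Spec_topNValuesLists db count bottomN (topNValuesLists db count bottomN)

-- ===== LEMMAS AND PROOFS =====

-- A's loop, on a duplicate-free key list disjoint from ret's keys, appends exactly
-- the keys up to the prefix-sum cutoff (started at ret's current total).
theorem topN_loop_eq (db : List (Int × List Int)) (count : Int) :
    ∀ (ks : List Int) (ret : PySem.Dict Int (List Int)),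
      ks.Nodup → (∀ k ∈ ks, ret.contains k = false) →
      (topNValuesLists.loop db count ks ret).items =
        ret.items ++
          (ks.take (altCut count (altPrefixes db ks ((ret.values.map (fun a => (a.length : Int))).sum)))).map
            (fun k => (k, ((PySem.Dict.mk db).get? k).getD [])) := by
  intro ks
  induction ks with
  | nil => intro ret _ _; simp [topNValuesLists.loop, altPrefixes, altCut]
  | cons k rest ih =>
    intro ret hnd hdisj
    have hk : ret.contains k = false := hdisj k (by simp)
    by_cases h : (ret.values.map (fun a => (a.length : Int))).sum < count
    · have hitems := PySem.Dict.items_insert_of_not_contains (d := ret)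
        (k := k) (v := ((PySem.Dict.mk db).get? k).getD []) hk
      have hrest : ∀ j ∈ rest, (ret.insert k (((PySem.Dict.mk db).get? k).getD [])).contains j = false := by
        intro j hj
        have hjne : j ≠ k := by
          intro he; exact (List.nodup_cons.mp hnd).1 (he ▸ hj)
        rw [PySem.Dict.contains_insert]
        simp [hjne, hdisj j (List.mem_cons_of_mem _ hj)]
      have hsum : ((ret.insert k (((PySem.Dict.mk db).get? k).getD [])).values.map (fun a => (a.length : Int))).sum
          = (ret.values.map (fun a => (a.length : Int))).sum + (((PySem.Dict.mk db).get? k).getD []).length := by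
        simp [PySem.Dict.values, hitems]
      have := ih (ret.insert k (((PySem.Dict.mk db).get? k).getD [])) (List.nodup_cons.mp hnd).2 hrest
      simp only [topNValuesLists.loop, altPrefixes, altCut, if_pos h]
      rw [this, hsum, hitems]
      simp [List.take_succ_cons]
    · simp [topNValuesLists.loop, altPrefixes, altCut, if_neg h]

-- ===== VERDICT (by name: the statement is the Claim_ definition above) =====
theorem topNValuesLists_spec : Claim_equal_topNValuesLists := by
  intro db count bottomN _ hpre
  unfold Spec_topNValuesLists topNValuesLists topNValuesLists_alt
  have hkeys : (PySem.Dict.mk db).keys = db.map (·.1) := rfl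
  set keys := (if bottomN then PySem.List.sorted (db.map (·.1)) (fun x => x) false
    else (PySem.List.sorted (db.map (·.1)) (fun x => x) false).reverse) with hkeysdef
  unfold Pre_topNValuesLists at hpre
  have hnd : keys.Nodup := by
    have hs : (PySem.List.sorted (db.map (·.1)) (fun x => x) false).Nodup :=
      (PySem.List.sorted_perm (db.map (·.1)) (fun x => x) false).nodup_iff.mpr hpre
    rw [hkeysdef]
    by_cases hb : bottomN
    · simpa [hb] using hs
    · simpa [hb] using List.nodup_reverse.mpr hs
  have hloop := topN_loop_eq db count keys PySem.Dict.empty hnd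
    (by intro k _; simp [PySem.Dict.contains_empty])
  have hfold :=
    PySem.Dict.items_foldl_insert_fresh
      (l := keys.take (altCut count (altPrefixes db keys 0)))
      (k := fun j => j) (v := fun j => ((PySem.Dict.mk db).get? j).getD [])
      (d := PySem.Dict.empty)
      (by intro a _; simp [PySem.Dict.contains_empty])
      (by simpa using hnd.sublist (List.take_sublist _ _))
  simp only [hkeys]
  rw [hloop]
  simp only [PySem.Dict.values, PySem.Dict.empty] at *
  simp [hfold]
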